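-- pv_equiv track=rewrite | github.com/janka-moeller/Sig-SPT | Signature_portfolios_functions.py | create_word_list
-- ===== SOURCE A (Python) =====
-- def create_word_list(dim,order):
--     """
--     Created the list of words associated to the elements of the signature.
--     Each word is given as a list of integers.
--
--     Parameters
--     ----------
--     dim : int
--         the dimension of the process of which the signature should be calculated.
--     order : int
--         the order of the signature.
--
--     Returns
--     -------
--     res : list of list of int
--         list of the words.
--
--     """
--     res=[[]]
--     for i in range(order):
--         if i==0:
--             start_idx=0
--         else:
--             start_idx=dim**(i-1)+old_start_idx
--         for r in res[start_idx:]: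
--             for d in range(1,dim+1):
--                 res.append(r+[d])
--         old_start_idx=start_idx
--     return res
-- ===== SOURCE B (Python) =====
-- import itertools
--
-- def create_word_list(dim, order):
--     if dim <= 0:
--         return [[]]
--     res = []
--     for length in range(max(order, 0) + 1):
--         for w in itertools.product(range(1, dim + 1), repeat=length):
--             res.append(list(w))
--     return res
-- ===== Notes on version B (the rewrite author's own statement) =====
-- stated objective: idiomatic
-- what changed: Replaces the incremental scheme that re-scans a slice of the growing result via hand-maintained start_idx/old_start_idx indices with direct per-length enumeration: for each length 1..order append every word of itertools.product(range(1,dim+1), repeat=length), with an early return of [[]] for an empty alphabet (dim<=0).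
import Mathlib
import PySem

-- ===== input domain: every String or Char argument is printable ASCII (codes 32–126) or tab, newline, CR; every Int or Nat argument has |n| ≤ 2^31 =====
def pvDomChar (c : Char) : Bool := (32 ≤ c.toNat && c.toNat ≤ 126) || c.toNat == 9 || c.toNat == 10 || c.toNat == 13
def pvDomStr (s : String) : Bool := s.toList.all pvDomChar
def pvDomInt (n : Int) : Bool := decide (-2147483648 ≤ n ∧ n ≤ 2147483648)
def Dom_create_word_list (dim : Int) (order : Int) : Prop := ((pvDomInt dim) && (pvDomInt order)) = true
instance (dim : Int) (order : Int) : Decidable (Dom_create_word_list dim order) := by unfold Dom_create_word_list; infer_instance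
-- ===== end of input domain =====

-- B replaces A's incremental start_idx/old_start_idx slice-rescanning scheme with direct
-- per-length enumeration via itertools.product (same results, same cost; idiomatic).

-- ===== PORT A =====
-- literal transliteration of A: res=[[]]; for i in range(order): compute start_idx,
-- append r+[d] for r in res[start_idx:], d in range(1,dim+1); state = (res, old_start_idx)
def create_word_list (dim : Int) (order : Int) : List (List Int) :=
  ((PySem.List.pyRange 0 order 1).foldl
    (fun (st : List (List Int) × Int) (i : Int) =>
      let start_idx : Int := if i = 0 then 0 else dim ^ (i - 1).toNat + st.2
      let res' : List (List Int) :=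
        (PySem.List.slice st.1 (some start_idx) none).foldl
          (fun acc r =>
            (PySem.List.pyRange 1 (dim + 1) 1).foldl
              (fun acc2 d => acc2 ++ [r ++ [d]]) acc)
          st.1
      (res', start_idx))
    (([[]] : List (List Int)), (0 : Int))).1

-- ===== PORT B =====
-- itertools.product(pool, repeat=n), each tuple rendered as a list (documented semantics of product)
def pyProduct (dim : Int) : Nat → List (List Int)
  | 0 => [[]]
  | n + 1 => (pyProduct dim n).flatMap
      (fun w => (PySem.List.pyRange 1 (dim + 1) 1).map (fun d => w ++ [d]))

-- literal transliteration of Source B: if dim<=0: return [[]]; res=[];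
-- for length in range(max(order,0)+1): for w in product(range(1,dim+1), repeat=length): res.append(list(w))
def create_word_list_alt (dim : Int) (order : Int) : List (List Int) :=
  if dim ≤ 0 then [[]]
  else
    (PySem.List.pyRange 0 (max order 0 + 1) 1).foldl
      (fun res L => (pyProduct dim L.toNat).foldl (fun acc w => acc ++ [w]) res)
      []

-- ===== PRECONDITION & SPEC =====
def Spec_create_word_list (dim : Int) (order : Int) (out : List (List Int)) : Prop := out = create_word_list_alt dim order
instance (dim : Int) (order : Int) (out : List (List Int)) : Decidable (Spec_create_word_list dim order out) := by unfold Spec_create_word_list; infer_instance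

-- ===== CLAIM (what is proved, stated in full; the proofs are below) =====
def Claim_equal_create_word_list : Prop := ∀ (dim : Int) (order : Int), Dom_create_word_list dim order → Spec_create_word_list dim order (create_word_list dim order)

-- ===== LEMMAS AND PROOFS =====

-- all words of length ≤ n over pool, grouped by length
def allW (dim : Int) (n : Nat) : List (List Int) :=
  (List.range (n + 1)).flatMap (pyProduct dim)

-- number of words of length < n (geometric sum)
def geo (k : Nat) (n : Nat) : Nat :=
  ((List.range n).map (fun j => k ^ j)).sum

lemma length_pyProduct (dim : Int) (n : Nat) :
    (pyProduct dim n).length = dim.toNat ^ n := by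
  induction n with
  | zero => simp [pyProduct]
  | succ m ih =>
    simp [pyProduct, List.length_flatMap, ih, pow_succ, mul_comm,
      List.map_const', List.sum_replicate, smul_eq_mul]

lemma geo_succ (k n : Nat) : geo k (n + 1) = geo k n + k ^ n := by
  simp [geo, List.range_succ]

lemma length_range_flatMap (dim : Int) (n : Nat) :
    ((List.range n).flatMap (pyProduct dim)).length = geo dim.toNat n := by
  induction n with
  | zero => simp [geo]
  | succ m ih =>
    rw [List.range_succ, List.flatMap_append, List.length_append, ih,
      geo_succ]
    simp [length_pyProduct]

lemma allW_succ (dim : Int) (n : Nat) :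
    allW dim (n + 1) = allW dim n ++ pyProduct dim (n + 1) := by
  simp [allW, List.range_succ]

lemma drop_allW (dim : Int) (n : Nat) :
    (allW dim n).drop (geo dim.toNat n) = pyProduct dim n := by
  have h : allW dim n = (List.range n).flatMap (pyProduct dim) ++ pyProduct dim n := by
    simp [allW, List.range_succ]
  have hlen : geo dim.toNat n = ((List.range n).flatMap (pyProduct dim)).length :=
    (length_range_flatMap dim n).symm
  rw [h, List.drop_append_of_le_length (le_of_eq hlen), hlen, List.drop_length,
    List.nil_append]

-- inner double loop of A: append r+[d] for r in src, d in pool  ==  acc ++ src.flatMap (map append)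
lemma inner_loops (pool : List Int) (src : List (List Int)) (acc : List (List Int)) :
    src.foldl (fun acc r => pool.foldl (fun acc2 d => acc2 ++ [r ++ [d]]) acc) acc
      = acc ++ src.flatMap (fun r => pool.map (fun d => r ++ [d])) := by
  induction src generalizing acc with
  | nil => simp
  | cons r rs ih =>
    rw [List.foldl_cons, PySem.List.foldl_append_singleton_eq_map, ih,
      List.flatMap_cons, List.append_assoc]

-- the state of A's outer loop after n iterations, for dim ≥ 0
lemma stateA (dim : Int) (hd : 0 ≤ dim) (n : Nat) :
    (PySem.List.pyRange 0 (n : Int) 1).foldl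
      (fun (st : List (List Int) × Int) (i : Int) =>
        let start_idx : Int := if i = 0 then 0 else dim ^ (i - 1).toNat + st.2
        let res' : List (List Int) :=
          (PySem.List.slice st.1 (some start_idx) none).foldl
            (fun acc r =>
              (PySem.List.pyRange 1 (dim + 1) 1).foldl
                (fun acc2 d => acc2 ++ [r ++ [d]]) acc)
            st.1
        (res', start_idx))
      (([[]] : List (List Int)), (0 : Int))
    = (allW dim n, (geo dim.toNat (n - 1) : Int)) := by
  induction n with
  | zero =>
    rw [show PySem.List.pyRange 0 ((0 : Nat) : Int) 1 = [] from
      PySem.List.pyRange_one_eq_nil le_rfl]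
    simp [allW, pyProduct, geo]
  | succ m ih =>
    set pool := PySem.List.pyRange 1 (dim + 1) 1 with hpool
    rw [show ((m + 1 : Nat) : Int) = (m : Int) + 1 by push_cast; ring,
      PySem.List.pyRange_one_succ_right (by omega), List.foldl_append, ih]
    simp only [List.foldl_cons, List.foldl_nil]
    have hstart : (if (m : Int) = 0 then 0 else dim ^ ((m : Int) - 1).toNat + (geo dim.toNat (m - 1) : Int))
        = (geo dim.toNat m : Int) := by
      rcases Nat.eq_zero_or_pos m with hm | hm
      · subst hm; simp [geo]
      · rw [if_neg (by omega)]
        have h1 : ((m : Int) - 1).toNat = m - 1 := by omega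
        have h2 : dim ^ (m - 1) = ((dim.toNat ^ (m - 1) : Nat) : Int) := by
          rw [Nat.cast_pow, Int.toNat_of_nonneg hd]
        have h3 : geo dim.toNat m = geo dim.toNat (m - 1) + dim.toNat ^ (m - 1) := by
          have := geo_succ dim.toNat (m - 1)
          rw [Nat.sub_add_cancel hm] at this
          exact this
        rw [h1, h2, h3]; push_cast; ring
    rw [hstart]
    have hslice : PySem.List.slice (allW dim m) (some (geo dim.toNat m : Int)) none
        = pyProduct dim m := by
      rw [PySem.List.slice_from_natCast, drop_allW]
    rw [hslice, inner_loops]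
    have : allW dim m ++ (pyProduct dim m).flatMap (fun r => pool.map (fun d => r ++ [d]))
        = allW dim (m + 1) := by
      rw [allW_succ, hpool]; rfl
    rw [this]
    simp

-- B's outer loop over lengths, unrolled from the right
lemma foldB (dim : Int) (n : Nat) (acc : List (List Int)) :
    (List.range n).foldl
      (fun x (y : Nat) =>
        (pyProduct dim ((0 : Int) + (y : Int)).toNat).foldl (fun a w => a ++ [w]) x)
      acc
    = acc ++ (List.range n).flatMap (pyProduct dim) := by
  induction n generalizing acc with
  | zero => simp
  | succ m ih =>
    rw [List.range_succ, List.foldl_append, ih, List.foldl_cons, List.foldl_nil,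
      PySem.List.foldl_append_singleton_eq_self,
      show ((0 : Int) + (m : Int)).toNat = m by omega,
      List.flatMap_append, List.flatMap_cons, List.flatMap_nil, List.append_nil,
      List.append_assoc]

-- B evaluated for dim ≥ 1: all words of lengths 0..max order 0
lemma altB (dim order : Int) (hd : 1 ≤ dim) :
    create_word_list_alt dim order = allW dim (max order 0).toNat := by
  unfold create_word_list_alt
  rw [if_neg (by omega)]
  have hm : (max order 0 + 1 - 0).toNat = (max order 0).toNat + 1 := by omega
  rw [PySem.List.pyRange_one 0 (max order 0 + 1), hm, List.foldl_map, foldB]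
  simp [allW]

-- B for dim ≤ 0: the empty-alphabet early return
lemma altB_nonpos (dim order : Int) (hd : dim ≤ 0) :
    create_word_list_alt dim order = [[]] := by
  unfold create_word_list_alt
  rw [if_pos hd]

-- dim < 0: A's result component never changes (the inner range is empty)
lemma stateA_neg (dim : Int) (hd : dim ≤ 0) (l : List Int)
    (st : List (List Int) × Int) :
    (l.foldl
      (fun (st : List (List Int) × Int) (i : Int) =>
        let start_idx : Int := if i = 0 then 0 else dim ^ (i - 1).toNat + st.2
        let res' : List (List Int) :=
          (PySem.List.slice st.1 (some start_idx) none).foldl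
            (fun acc r =>
              (PySem.List.pyRange 1 (dim + 1) 1).foldl
                (fun acc2 d => acc2 ++ [r ++ [d]]) acc)
            st.1
        (res', start_idx))
      st).1 = st.1 := by
  induction l generalizing st with
  | nil => rfl
  | cons x xs ih =>
    rw [List.foldl_cons, ih]
    simp only
    rw [PySem.List.pyRange_one_eq_nil (by omega)]
    simp

-- ===== VERDICT (by name: the statement is the Claim_ definition above) =====
theorem create_word_list_spec : Claim_equal_create_word_list := by
  intro dim order _
  unfold Spec_create_word_list
  by_cases hd : dim ≤ 0
  · -- dim ≤ 0: both sides are [[]]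
    unfold create_word_list
    rw [stateA_neg dim hd, altB_nonpos dim order hd]
  · -- dim ≥ 1: A's loop invariant
    rw [altB dim order (by omega)]
    unfold create_word_list
    have hor : PySem.List.pyRange 0 order 1 = PySem.List.pyRange 0 (order.toNat : Int) 1 := by
      by_cases h : order ≤ 0
      · rw [PySem.List.pyRange_one_eq_nil h,
          PySem.List.pyRange_one_eq_nil (by omega)]
      · rw [Int.toNat_of_nonneg (by omega)]
    rw [hor, stateA dim (by omega) order.toNat]
    have : (max order 0).toNat = order.toNat := by omega
    rw [this]
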